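-- pv_equiv track=rewrite | github.com/Erdos-Projects/spring-2026-electricity-TX | scripts/ercot_dataset_catalog.py | normalize_dataset_ids
-- ===== SOURCE A (Python) =====
-- from typing import Dict, Iterable, List, Sequence
--
-- DATASET_ID_ALIASES: Dict[str, str] = {
--     "NP6-348-CD": "NP3-565-CD",
--     "NP6-787-ER": "NP4-523-CD",
--     "NP6-788-ER": "NP6-788-CD",
--     "NP6-86-CP": "NP6-331-CD",
--     "NP6-975-MCPE": "NP4-188-CD",
-- }
--
-- def normalize_dataset_ids(dataset_ids: Iterable[str]) -> List[str]:
--     unique: List[str] = []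
--     seen = set()
--     for dataset_id in dataset_ids:
--         cleaned = dataset_id.strip().upper()
--         cleaned = DATASET_ID_ALIASES.get(cleaned, cleaned)
--         if not cleaned or cleaned in seen:
--             continue
--         unique.append(cleaned)
--         seen.add(cleaned)
--     return unique
-- ===== SOURCE B (Python) =====
-- from typing import Dict, Iterable, List
--
-- DATASET_ID_ALIASES: Dict[str, str] = {
--     "NP6-348-CD": "NP3-565-CD",
--     "NP6-787-ER": "NP4-523-CD",
--     "NP6-788-ER": "NP6-788-CD",
--     "NP6-86-CP": "NP6-331-CD",
--     "NP6-975-MCPE": "NP4-188-CD",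
-- }
--
-- def _nub(xs: List[str]) -> List[str]:
--     # take the head, delete every later copy of it from the rest, repeat
--     out: List[str] = []
--     while xs:
--         head = xs[0]
--         out.append(head)
--         xs = [y for y in xs[1:] if y != head]
--     return out
--
-- def normalize_dataset_ids(dataset_ids: Iterable[str]) -> List[str]:
--     cleaned = [DATASET_ID_ALIASES.get(c, c)
--                for c in (s.strip().upper() for s in dataset_ids)]
--     return _nub([c for c in cleaned if c])
-- ===== Notes on version B (the rewrite author's own statement) =====
-- stated objective: alternative
-- what changed: Replaces A's single pass with a seen-set and continue guards by a transform-and-filter pass followed by a recursive nub that keeps each head and deletes its later copies from the remainder before recursing (no membership set is maintained).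
import Mathlib
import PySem

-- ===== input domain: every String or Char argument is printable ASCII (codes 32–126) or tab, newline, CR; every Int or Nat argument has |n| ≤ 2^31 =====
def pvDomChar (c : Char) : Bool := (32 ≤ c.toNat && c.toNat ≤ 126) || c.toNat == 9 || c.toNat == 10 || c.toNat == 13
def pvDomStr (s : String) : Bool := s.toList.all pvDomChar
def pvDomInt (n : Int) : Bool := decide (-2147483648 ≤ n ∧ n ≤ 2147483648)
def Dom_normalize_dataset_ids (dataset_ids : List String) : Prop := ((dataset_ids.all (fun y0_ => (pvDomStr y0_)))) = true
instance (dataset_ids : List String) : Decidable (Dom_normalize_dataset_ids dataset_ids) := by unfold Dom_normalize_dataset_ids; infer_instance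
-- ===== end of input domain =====

-- B replaces A's single pass with a seen set and continue guards by a map/filter pass
-- followed by a recursive nub (keep the head, delete its later copies, recurse) — alternative decomposition.

-- ===== PORT A =====
-- module-level constant shared by both versions
def DATASET_ID_ALIASES : PySem.Dict String String :=
  PySem.Dict.ofList [("NP6-348-CD", "NP3-565-CD"), ("NP6-787-ER", "NP4-523-CD"),
    ("NP6-788-ER", "NP6-788-CD"), ("NP6-86-CP", "NP6-331-CD"), ("NP6-975-MCPE", "NP4-188-CD")]

def normalize_dataset_ids (dataset_ids : List String) : List String :=
  (dataset_ids.foldl (fun (st : List String × PySem.Set String) dataset_id =>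
      let cleaned0 := PySem.Str.upper (PySem.Str.strip dataset_id)
      let cleaned := PySem.Dict.getD DATASET_ID_ALIASES cleaned0 cleaned0
      if cleaned = "" ∨ PySem.Set.contains st.2 cleaned then st
      else (st.1 ++ [cleaned], PySem.Set.add st.2 cleaned))
    ([], PySem.Set.empty)).1

-- ===== PORT B =====
-- _nub of Source B: while xs: take the head into out, delete its later copies from xs
def pvNubLoop (out : List String) : List String → List String
  | [] => out
  | x :: t => pvNubLoop (out ++ [x]) (t.filter (fun y => y ≠ x))
termination_by l => l.length
decreasing_by
  simp only [List.length_cons, List.length_unattach]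
  exact Nat.lt_succ_of_le (le_trans (List.length_filter_le _ _) (by simp))

def pvNub (xs : List String) : List String := pvNubLoop [] xs

def normalize_dataset_ids_alt (dataset_ids : List String) : List String :=
  let cleaned := dataset_ids.map (fun s =>
    let c := PySem.Str.upper (PySem.Str.strip s)
    PySem.Dict.getD DATASET_ID_ALIASES c c)
  pvNub (cleaned.filter (fun c => c ≠ ""))

-- ===== PRECONDITION & SPEC =====
def Spec_normalize_dataset_ids (dataset_ids : List String) (out : List String) : Prop := out = normalize_dataset_ids_alt dataset_ids
instance (dataset_ids : List String) (out : List String) : Decidable (Spec_normalize_dataset_ids dataset_ids out) := by unfold Spec_normalize_dataset_ids; infer_instance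

-- ===== CLAIM (what is proved, stated in full; the proofs are below) =====
def Claim_equal_normalize_dataset_ids : Prop := ∀ (dataset_ids : List String), Dom_normalize_dataset_ids dataset_ids → Spec_normalize_dataset_ids dataset_ids (normalize_dataset_ids dataset_ids)

-- ===== LEMMAS AND PROOFS =====

-- the while-loop accumulator peels off: pvNubLoop out l = out ++ pvNubLoop [] l
lemma pvNubLoop_acc (l : List String) (out : List String) :
    pvNubLoop out l = out ++ pvNubLoop [] l := by
  induction hn : l.length using Nat.strong_induction_on generalizing l out with
  | _ n ih =>
    cases l with
    | nil => simp [pvNubLoop]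
    | cons x t =>
      rw [pvNubLoop, pvNubLoop,
        ih (t.filter (fun y => y ≠ x)).length
          (by simpa [← hn] using Nat.lt_succ_of_le (List.length_filter_le _ _))
          (t.filter (fun y => y ≠ x)) (out ++ [x]) rfl,
        ih (t.filter (fun y => y ≠ x)).length
          (by simpa [← hn] using Nat.lt_succ_of_le (List.length_filter_le _ _))
          (t.filter (fun y => y ≠ x)) ([] ++ [x]) rfl]
      simp

-- hence pvNub satisfies the head-then-filter recursion
lemma pvNub_cons (x : String) (t : List String) :
    pvNub (x :: t) = x :: pvNub (t.filter (fun y => y ≠ x)) := by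
  unfold pvNub
  rw [pvNubLoop, pvNubLoop_acc]
  simp

-- the cleaning step both versions apply to each element
def pvClean (s : String) : String :=
  let c := PySem.Str.upper (PySem.Str.strip s)
  PySem.Dict.getD DATASET_ID_ALIASES c c

-- A's paired accumulator stays "diagonal": unique and seen are the same list,
-- and both evolve by the one-accumulator skip-empty Set.add step.
lemma loopA_diag (l : List String) (s : PySem.Set String) :
    l.foldl (fun (st : List String × PySem.Set String) x =>
        if pvClean x = "" ∨ PySem.Set.contains st.2 (pvClean x) then st
        else (st.1 ++ [pvClean x], PySem.Set.add st.2 (pvClean x))) (s, s)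
    = (l.foldl (fun t x => if pvClean x = "" then t else PySem.Set.add t (pvClean x)) s,
       l.foldl (fun t x => if pvClean x = "" then t else PySem.Set.add t (pvClean x)) s) := by
  induction l generalizing s with
  | nil => rfl
  | cons x t ih =>
      simp only [List.foldl_cons]
      have hstep : (if pvClean x = "" ∨ PySem.Set.contains s (pvClean x) then (s, s)
          else (s ++ [pvClean x], PySem.Set.add s (pvClean x)))
          = ((if pvClean x = "" then s else PySem.Set.add s (pvClean x)),
             (if pvClean x = "" then s else PySem.Set.add s (pvClean x))) := by
        by_cases he : pvClean x = ""
        · simp [he]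
        · by_cases hm : pvClean x ∈ s <;> simp [he, hm, PySem.Set.add, PySem.Set.contains]
      rw [hstep, ih]

-- the seen-set fold equals the recursive filter-the-rest nub of the unseen elements
lemma foldl_add_eq_nub (l : List String) (s : PySem.Set String) :
    l.foldl PySem.Set.add s = s ++ pvNub (l.filter (fun y => ¬ y ∈ s)) := by
  induction hn : l.length using Nat.strong_induction_on generalizing l s with
  | _ n ih =>
    cases l with
    | nil => simp [pvNub, pvNubLoop]
    | cons x t =>
      by_cases hx : x ∈ s
      · have := ih t.length (by simp [← hn]) t rfl (s := s)
        simp [hx, this]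
      · simp only [List.foldl_cons, PySem.Set.add, PySem.Set.contains]
        rw [if_neg (by simpa using hx)]
        have ht := ih (t.filter (fun y => ¬ y ∈ s)).length
          (by simpa [← hn] using Nat.lt_succ_of_le (List.length_filter_le _ _))
          (t.filter (fun y => ¬ y ∈ s)) rfl (s := s ++ [x])
        have hre : (t.filter (fun y => ¬ y ∈ s)).foldl PySem.Set.add (s ++ [x])
            = t.foldl PySem.Set.add (s ++ [x]) := by
          have := ih t.length (by simp [← hn]) t rfl (s := s ++ [x])
          rw [this, ih (t.filter (fun y => ¬ y ∈ s)).length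
            (by simpa [← hn] using Nat.lt_succ_of_le (List.length_filter_le _ _))
            (t.filter (fun y => ¬ y ∈ s)) rfl (s := s ++ [x])]
          congr 1
          rw [List.filter_filter]
          congr 1
          apply List.filter_congr
          intro y _
          by_cases hy : y ∈ s <;> by_cases hyx : y = x <;> simp [hy, hyx, hx]
        rw [← hre, ht, List.append_assoc]
        congr 1
        rw [show (x :: t).filter (fun y => ¬ y ∈ s) = x :: t.filter (fun y => ¬ y ∈ s) from by
          simp [hx], pvNub_cons]
        simp only [List.singleton_append, List.cons.injEq, true_and]
        congr 1
        apply List.filter_congr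
        intro y hy
        have hys : y ∉ s := by simpa using (List.mem_filter.mp hy).2
        simp [hys]

-- ===== VERDICT (by name: the statement is the Claim_ definition above) =====
theorem normalize_dataset_ids_spec : Claim_equal_normalize_dataset_ids := by
  intro l _
  show normalize_dataset_ids l = normalize_dataset_ids_alt l
  unfold normalize_dataset_ids normalize_dataset_ids_alt
  have hA := loopA_diag l []
  simp only [pvClean] at hA
  rw [show (PySem.Set.empty : PySem.Set String) = [] from rfl, hA]
  have hE : pvNub (((l.map (fun s =>
        PySem.Dict.getD DATASET_ID_ALIASES (PySem.Str.upper (PySem.Str.strip s))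
          (PySem.Str.upper (PySem.Str.strip s)))).filter (fun c => c ≠ "")))
      = List.foldl (fun t x =>
          if PySem.Dict.getD DATASET_ID_ALIASES (PySem.Str.upper (PySem.Str.strip x))
              (PySem.Str.upper (PySem.Str.strip x)) = "" then t
          else PySem.Set.add t (PySem.Dict.getD DATASET_ID_ALIASES
              (PySem.Str.upper (PySem.Str.strip x)) (PySem.Str.upper (PySem.Str.strip x))))
        [] l := by
    have h0 := foldl_add_eq_nub ((l.map (fun s =>
        PySem.Dict.getD DATASET_ID_ALIASES (PySem.Str.upper (PySem.Str.strip s))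
          (PySem.Str.upper (PySem.Str.strip s)))).filter (fun c => c ≠ "")) []
    simp only [List.not_mem_nil, not_false_iff, decide_true, List.filter_true,
      List.nil_append] at h0
    rw [← h0,
      ← PySem.List.foldl_ite_eq_foldl_filter (p := fun c => c ≠ "") (f := PySem.Set.add),
      List.foldl_map]
    apply PySem.List.foldl_congr_mem
    intro acc x _
    by_cases he : PySem.Dict.getD DATASET_ID_ALIASES (PySem.Str.upper (PySem.Str.strip x))
        (PySem.Str.upper (PySem.Str.strip x)) = "" <;> simp [he]
  exact hE.symm
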